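-- pv_equiv track=rewrite | github.com/dflaten/advent-of-code-2024 | 2024/2024-12-4/day4_only_straight.py | find_all_instances_in_grid
-- ===== SOURCE A (Python) =====
-- def search_direction(row: int, col: int, dir_x: int, dir_y: int, grid: list[list[str]], word: str):
--     rows = len(grid)
--     columns = len(grid[0])
--     if grid[row][col] != word[0]:
--         return False
--
--     length = len(word)
--
--     # Check if the word would fit in this direction
--     end_row = row + (length - 1) * dir_x
--     end_col = col + (length - 1) * dir_y
--
--     if not (0 <= end_row < rows and 0 <= end_col < columns):
--         return False
--
--     # Check each character along the path
--     for i in range(1, length):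
--         curr_row = row + i * dir_x
--         curr_col = col + i * dir_y
--         if grid[curr_row][curr_col] != word[i]:
--             return False
--
--     return True
--
-- def search_from_cell(row, col, word, grid) -> bool:
--         # All 8 directions: right, down-right, down, down-left, left, up-left, up, up-right
--         directions = [
--             (0, 1), (1, 1), (1, 0), (1, -1),
--             (0, -1), (-1, -1), (-1, 0), (-1, 1)
--         ]
--
--         for dir_x, dir_y in directions:
--             if search_direction(row=row, col=col, dir_x =dir_x, dir_y=dir_y, grid=grid, word=word):
--                 return True
--         return False
--
-- def find_all_instances_in_grid(character_grid: list[list[str]], word: str) -> int: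
--     '''
--     Finds all instances of the word in the grid.
--     '''
--     number_of_instances = 0
--     rows = len(character_grid)
--     columns = len(character_grid[0])
--     # Search from each cell as a starting point
--     for row in range(rows):
--         for col in range(columns):
--             if search_from_cell(row=row, col=col, grid=character_grid, word=word):
--                number_of_instances += 1
--     return number_of_instances
-- ===== SOURCE B (Python) =====
-- DIRECTIONS = ((0, 1), (1, 1), (1, 0), (1, -1), (0, -1), (-1, -1), (-1, 0), (-1, 1))
--
-- def find_all_instances_in_grid(character_grid: list[list[str]], word: str) -> int:
--     '''
--     Backward dynamic programming over word positions: for each direction,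
--     start from the set of cells holding the word's last character and
--     propagate that frontier backwards through the word one character at a
--     time (a cell survives if it holds the character and its successor cell
--     is in the previous frontier); the final frontier is the set of start
--     cells for that direction.  The answer is the size of the union of the
--     eight start-cell sets.  No per-cell walk along the word is ever made.
--     '''
--     rows = len(character_grid)
--     columns = len(character_grid[0])
--     all_cells = [(r, c) for r in range(rows) for c in range(columns)]
--     starts = set()
--     for dx, dy in DIRECTIONS:
--         frontier = {(r, c) for (r, c) in all_cells
--                     if character_grid[r][c] == word[-1]}
--         for ch in reversed(word[:-1]):
--             if not frontier:
--                 break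
--             frontier = {(r, c) for (r, c) in all_cells
--                         if character_grid[r][c] == ch and (r + dx, c + dy) in frontier}
--         starts |= frontier
--     return len(starts)
-- ===== Notes on version B (the rewrite author's own statement) =====
-- stated objective: alternative
-- what changed: B replaces A's per-cell walk along the word (probe each cell in each of 8 directions character-by-character with a bounds check) by backward dynamic programming: per direction it keeps a frontier set of cells matching the current word suffix and propagates it one word character at a time via set membership of the successor cell, then returns the size of the union of the 8 final frontiers.
-- outside the precondition, e.g. on find_all_instances_in_grid([[], ['a']], ''): A returns 0, B returns 0
import Mathlib
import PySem

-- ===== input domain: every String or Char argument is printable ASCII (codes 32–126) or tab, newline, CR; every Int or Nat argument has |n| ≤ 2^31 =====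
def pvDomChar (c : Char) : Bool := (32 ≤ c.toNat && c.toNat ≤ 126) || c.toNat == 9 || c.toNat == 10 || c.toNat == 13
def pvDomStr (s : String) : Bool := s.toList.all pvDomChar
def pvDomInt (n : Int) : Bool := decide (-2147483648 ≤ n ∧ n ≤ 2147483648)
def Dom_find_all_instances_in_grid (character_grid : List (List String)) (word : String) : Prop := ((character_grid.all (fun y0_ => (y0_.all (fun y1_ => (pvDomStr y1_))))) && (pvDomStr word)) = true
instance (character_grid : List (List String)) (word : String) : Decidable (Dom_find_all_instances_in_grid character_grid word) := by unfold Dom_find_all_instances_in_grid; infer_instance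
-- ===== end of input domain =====

-- B replaces A's per-cell character-by-character walk by a backward dynamic-programming pass
-- per direction: a frontier set of cells matching the current word suffix is propagated one
-- word character at a time; the answer is the size of the union of the 8 final frontiers.

-- ===== PORT A =====
-- shared accessors: grid[r][c] and word[i], total via defaults; under Pre_ every use is in range
def pvGridGet (grid : List (List String)) (r c : Int) : String :=
  PySem.List.pyGetD (PySem.List.pyGetD grid r []) c ""

def pvWChar (word : String) (i : Int) : Char :=
  PySem.List.pyGetD word.toList i ' '

def pvSearchDirection (row col dirx diry : Int) (grid : List (List String)) (word : String) : Bool :=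
  let rows : Int := grid.length
  let columns : Int := (PySem.List.pyGetD grid 0 ([] : List String)).length
  if (pvGridGet grid row col).toList ≠ [pvWChar word 0] then false
  else
    let length : Int := word.toList.length
    let endRow : Int := row + (length - 1) * dirx
    let endCol : Int := col + (length - 1) * diry
    if ¬(0 ≤ endRow ∧ endRow < rows ∧ 0 ≤ endCol ∧ endCol < columns) then false
    else
      (PySem.List.pyRange 1 length 1).all fun i =>
        (pvGridGet grid (row + i * dirx) (col + i * diry)).toList == [pvWChar word i]

def pvDirections : List (Int × Int) :=
  [(0, 1), (1, 1), (1, 0), (1, -1), (0, -1), (-1, -1), (-1, 0), (-1, 1)]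

def pvSearchFromCell (row col : Int) (word : String) (grid : List (List String)) : Bool :=
  pvDirections.any fun d => pvSearchDirection row col d.1 d.2 grid word

def find_all_instances_in_grid (character_grid : List (List String)) (word : String) : Int :=
  let rows : Int := character_grid.length
  let columns : Int := (PySem.List.pyGetD character_grid 0 ([] : List String)).length
  (PySem.List.pyRange 0 rows 1).foldl
    (fun acc row =>
      (PySem.List.pyRange 0 columns 1).foldl
        (fun acc2 col => if pvSearchFromCell row col word character_grid then acc2 + 1 else acc2)
        acc)
    0

-- ===== PORT B =====
-- all_cells = [(r, c) for r in range(rows) for c in range(columns)]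
def pvAllCells (rows cols : Int) : List (Int × Int) :=
  (PySem.List.pyRange 0 rows 1).flatMap fun r =>
    (PySem.List.pyRange 0 cols 1).map fun c => (r, c)

-- character_grid[r][c] == ch  (a cell string compared with a one-character string)
def pvCellEq (grid : List (List String)) (p : Int × Int) (ch : Char) : Bool :=
  (pvGridGet grid p.1 p.2).toList == [ch]

def find_all_instances_in_grid_alt (character_grid : List (List String)) (word : String) : Int :=
  let rows : Int := character_grid.length
  let columns : Int := (PySem.List.pyGetD character_grid 0 ([] : List String)).length
  let allCells := pvAllCells rows columns
  let starts :=
    pvDirections.foldl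
      (fun (starts : PySem.Set (Int × Int)) d =>
        let frontier0 := PySem.Set.ofList (allCells.filter fun p =>
          pvCellEq character_grid p (PySem.List.pyGetD word.toList (-1) ' '))
        let frontier := ((PySem.List.slice word.toList none (some (-1))).reverse).foldl
          (fun (fr : PySem.Set (Int × Int)) ch =>
            if fr = [] then fr    -- 'if not frontier: break' — an empty frontier stays empty
            else PySem.Set.ofList (allCells.filter fun p =>
              pvCellEq character_grid p ch && PySem.Set.contains fr (p.1 + d.1, p.2 + d.2)))
          frontier0
        PySem.Set.update starts frontier)
      PySem.Set.empty
  (starts.length : Int)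

-- ===== PRECONDITION & SPEC =====
-- Pre_ = where the Python A returns: nonempty grid, nonempty word, and no row shorter than
-- row 0 (a shorter row is reached by the col < len(grid[0]) scan and raises IndexError; an
-- empty word raises at word[0]). Slightly narrower than A's domain: when len(grid[0]) == 0
-- no cell is ever scanned, so A also returns (0) on an empty word — both programs return 0 there.
def Pre_find_all_instances_in_grid (character_grid : List (List String)) (word : String) : Prop :=
  character_grid ≠ [] ∧ word ≠ "" ∧
    ∀ row ∈ character_grid, (character_grid.headI).length ≤ row.length
instance (character_grid : List (List String)) (word : String) : Decidable (Pre_find_all_instances_in_grid character_grid word) := by unfold Pre_find_all_instances_in_grid; infer_instance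

def pvWitness_find_all_instances_in_grid : List (List String) × String := ([["X", "A"], ["A", "X"]], "XA")

def Spec_find_all_instances_in_grid (character_grid : List (List String)) (word : String) (out : Int) : Prop := out = find_all_instances_in_grid_alt character_grid word
instance (character_grid : List (List String)) (word : String) (out : Int) : Decidable (Spec_find_all_instances_in_grid character_grid word out) := by unfold Spec_find_all_instances_in_grid; infer_instance

-- ===== CLAIM (what is proved, stated in full; the proofs are below) =====
def Claim_equal_find_all_instances_in_grid : Prop := ∀ (character_grid : List (List String)) (word : String), Dom_find_all_instances_in_grid character_grid word → Pre_find_all_instances_in_grid character_grid word → Spec_find_all_instances_in_grid character_grid word (find_all_instances_in_grid character_grid word)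

-- ===== LEMMAS AND PROOFS =====

-- in-bounds test for a cell of the grid
def pvInB (grid : List (List String)) (p : Int × Int) : Bool :=
  decide (0 ≤ p.1 ∧ p.1 < (grid.length : Int) ∧
          0 ≤ p.2 ∧ p.2 < ((PySem.List.pyGetD grid 0 ([] : List String)).length : Int))

-- "the word suffix l matches, in bounds, starting at p in direction (dx, dy)"
def pvChk (grid : List (List String)) (dx dy : Int) : List Char → (Int × Int) → Bool
  | [], _ => true
  | ch :: rest, p =>
      pvInB grid p && pvCellEq grid p ch && pvChk grid dx dy rest (p.1 + dx, p.2 + dy)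

-- B's per-cell predicate: some direction matches (via pvChk)
def pvQ (grid : List (List String)) (w : List Char) (p : Int × Int) : Bool :=
  pvDirections.any fun d => pvChk grid d.1 d.2 w p

-- the matched cells, row-major and duplicate-free
def pvK (grid : List (List String)) (w : List Char) : List (Int × Int) :=
  (pvAllCells (grid.length : Int) ((PySem.List.pyGetD grid 0 ([] : List String)).length : Int)).filter
    (pvQ grid w)

lemma pv_mem_allCells (rows cols : Int) (p : Int × Int) :
    p ∈ pvAllCells rows cols ↔ (0 ≤ p.1 ∧ p.1 < rows ∧ 0 ≤ p.2 ∧ p.2 < cols) := by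
  obtain ⟨r, c⟩ := p
  simp only [pvAllCells, List.mem_flatMap, List.mem_map, PySem.List.mem_pyRange_one, Prod.mk.injEq]
  constructor
  · rintro ⟨a, ha, b, hb, rfl, rfl⟩; exact ⟨ha.1, ha.2, hb.1, hb.2⟩
  · rintro ⟨h1, h2, h3, h4⟩; exact ⟨r, ⟨h1, h2⟩, c, ⟨h3, h4⟩, rfl, rfl⟩

lemma pv_mem_allCells_inB (grid : List (List String)) (p : Int × Int) :
    p ∈ pvAllCells (grid.length : Int) ((PySem.List.pyGetD grid 0 ([] : List String)).length : Int)
      ↔ pvInB grid p = true := by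
  rw [pv_mem_allCells]; simp [pvInB]

-- a flatMap whose pieces are tagged by distinct first components is Nodup
lemma pv_nodup_flatMap_tag (R : List Int) (f : Int → List (Int × Int)) (hR : R.Nodup)
    (h1 : ∀ r, (f r).Nodup) (h2 : ∀ r x, x ∈ f r → x.1 = r) : (R.flatMap f).Nodup := by
  induction R with
  | nil => simp
  | cons r t ih =>
    rw [List.flatMap_cons, List.nodup_append]
    refine ⟨h1 r, ih hR.of_cons, fun x hx y hy => ?_⟩
    intro hxy; subst hxy
    rcases List.mem_flatMap.mp hy with ⟨r', hr', hxr'⟩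
    have e1 := h2 r x hx
    have e2 := h2 r' x hxr'
    rw [e1] at e2
    subst e2
    exact (List.nodup_cons.mp hR).1 hr'

lemma pv_nodup_allCells (rows cols : Int) : (pvAllCells rows cols).Nodup := by
  apply pv_nodup_flatMap_tag
  · exact PySem.List.nodup_pyRange_one _ _
  · intro r
    refine List.Nodup.map ?_ (PySem.List.nodup_pyRange_one _ _)
    intro a b hab; simpa using hab
  · intro r x hx
    rcases List.mem_map.mp hx with ⟨c, -, rfl⟩
    rfl

-- membership in a frontier (a filter of allCells)
lemma pv_contains_filter (grid : List (List String)) (f : Int × Int → Bool) (q : Int × Int) :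
    PySem.Set.contains
      ((pvAllCells (grid.length : Int) ((PySem.List.pyGetD grid 0 ([] : List String)).length : Int)).filter f)
      q = (pvInB grid q && f q) := by
  apply Bool.coe_iff_coe.mp
  rw [PySem.Set.contains_iff, List.mem_filter, pv_mem_allCells_inB]
  simp

-- a leading in-bounds test is absorbed by pvChk of a nonempty suffix
lemma pv_chk_absorb (grid : List (List String)) (dx dy : Int) (l : List Char) (hl : l ≠ [])
    (q : Int × Int) :
    (pvInB grid q && pvChk grid dx dy l q) = pvChk grid dx dy l q := by
  cases l with
  | nil => exact absurd rfl hl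
  | cons a t => cases hq : pvInB grid q <;> simp [pvChk, hq]

-- the frontier loop computes exactly the cells matching the suffix ys ++ [last]
lemma pv_frontier_inv (grid : List (List String)) (dx dy : Int) (last : Char) (ys : List Char) :
    ys.foldr
      (fun ch fr =>
        PySem.Set.ofList
          (((pvAllCells (grid.length : Int) ((PySem.List.pyGetD grid 0 ([] : List String)).length : Int)).filter
            fun p => pvCellEq grid p ch && PySem.Set.contains fr (p.1 + dx, p.2 + dy))))
      (PySem.Set.ofList
        ((pvAllCells (grid.length : Int) ((PySem.List.pyGetD grid 0 ([] : List String)).length : Int)).filter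
          fun p => pvCellEq grid p last))
    = (pvAllCells (grid.length : Int) ((PySem.List.pyGetD grid 0 ([] : List String)).length : Int)).filter
        (pvChk grid dx dy (ys ++ [last])) := by
  induction ys with
  | nil =>
    rw [List.foldr_nil,
      PySem.Set.ofList_eq_self_of_nodup _ (List.Nodup.filter _ (pv_nodup_allCells _ _))]
    apply List.filter_congr
    intro p hp
    have hb := (pv_mem_allCells_inB grid p).mp hp
    simp [pvChk, hb]
  | cons ch ys ih =>
    rw [List.foldr_cons, ih,
      PySem.Set.ofList_eq_self_of_nodup _ (List.Nodup.filter _ (pv_nodup_allCells _ _))]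
    apply List.filter_congr
    intro p hp
    have hb := (pv_mem_allCells_inB grid p).mp hp
    rw [pv_contains_filter, pv_chk_absorb grid dx dy (ys ++ [last]) (by simp) (p.1 + dx, p.2 + dy)]
    simp [pvChk, hb]

-- characterisation of pvChk by indices
lemma pv_chk_iff (grid : List (List String)) (dx dy : Int) (l : List Char) (p : Int × Int) :
    pvChk grid dx dy l p = true ↔
      ∀ (i : Nat) (h : i < l.length),
        pvInB grid (p.1 + (i : Int) * dx, p.2 + (i : Int) * dy) = true ∧
        pvCellEq grid (p.1 + (i : Int) * dx, p.2 + (i : Int) * dy) l[i] = true := by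
  induction l generalizing p with
  | nil => simp [pvChk]
  | cons ch rest ih =>
    simp only [pvChk, Bool.and_eq_true, ih]
    constructor
    · rintro ⟨⟨hB, hE⟩, hrest⟩
      intro i hi
      cases i with
      | zero => simpa using ⟨hB, hE⟩
      | succ j =>
        have := hrest j (by simpa using Nat.lt_of_succ_lt_succ hi)
        have e1 : p.1 + ((j : Int) + 1) * dx = p.1 + dx + (j : Int) * dx := by ring
        have e2 : p.2 + ((j : Int) + 1) * dy = p.2 + dy + (j : Int) * dy := by ring
        simpa [Nat.cast_succ, e1, e2] using this
    · intro h
      refine ⟨?_, ?_⟩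
      · simpa using h 0 (by simp)
      · intro j hj
        have := h (j + 1) (by simpa using Nat.succ_lt_succ hj)
        have e1 : p.1 + ((j : Int) + 1) * dx = p.1 + dx + (j : Int) * dx := by ring
        have e2 : p.2 + ((j : Int) + 1) * dy = p.2 + dy + (j : Int) * dy := by ring
        simpa [Nat.cast_succ, e1, e2] using this

-- bounds of every intermediate cell follow from the bounds of both endpoints (|dx| ≤ 1)
lemma pv_mid_bounds (x lim dx : Int) (n : Nat) (i : Nat)
    (hd : dx = -1 ∨ dx = 0 ∨ dx = 1)
    (hx : 0 ≤ x ∧ x < lim) (hend : 0 ≤ x + ((n : Int) - 1) * dx ∧ x + ((n : Int) - 1) * dx < lim)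
    (hi : i < n) :
    0 ≤ x + (i : Int) * dx ∧ x + (i : Int) * dx < lim := by
  have hi' : (i : Int) ≤ (n : Int) - 1 := by
    have : (i : Int) < (n : Int) := by exact_mod_cast hi
    omega
  have hi0 : 0 ≤ (i : Int) := Int.natCast_nonneg i
  rcases hd with rfl | rfl | rfl <;>
    simp only [mul_neg_one, mul_zero, mul_one, add_zero] at * <;> omega

-- xs[-1] is the last element of a nonempty list
lemma pv_pyGetD_neg_one {α : Type} (xs : List α) (h : xs ≠ []) (d : α) :
    PySem.List.pyGetD xs (-1) d = xs.getLast h := by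
  have hl : 1 ≤ xs.length := List.length_pos_of_ne_nil h
  simp [PySem.List.pyGetD, PySem.List.pyGet?, PySem.List.pyIdx?, hl,
    List.getElem?_eq_getElem (by omega : xs.length - 1 < xs.length), List.getLast_eq_getElem]

-- word[i] as a character of the word's character list
lemma pv_wchar_eq (word : String) (i : Nat) (hi : i < word.toList.length) :
    pvWChar word (i : Int) = word.toList[i] := by
  simp [pvWChar, PySem.List.pyGetD_natCast, List.getD_eq_getElem?_getD,
    List.getElem?_eq_getElem hi]

-- A's per-(direction,cell) check equals pvChk on in-bounds cells, for |dx|,|dy| ≤ 1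
lemma pv_dir_chk (grid : List (List String)) (word : String) (hw : word.toList ≠ [])
    (r c dx dy : Int)
    (hdx : dx = -1 ∨ dx = 0 ∨ dx = 1) (hdy : dy = -1 ∨ dy = 0 ∨ dy = 1)
    (hB0 : pvInB grid (r, c) = true) :
    pvSearchDirection r c dx dy grid word = pvChk grid dx dy word.toList (r, c) := by
  have hn : 0 < word.toList.length := List.length_pos_of_ne_nil hw
  apply Bool.coe_iff_coe.mp
  rw [pv_chk_iff]
  simp only [pvSearchDirection]
  simp only [pvInB, decide_eq_true_eq] at hB0
  constructor
  · intro hA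
    by_cases h0 : (pvGridGet grid r c).toList ≠ [pvWChar word 0]
    · rw [if_pos h0] at hA; exact absurd hA (by simp)
    by_cases hfit : (0 ≤ r + ((word.toList.length : Int) - 1) * dx ∧
        r + ((word.toList.length : Int) - 1) * dx < (grid.length : Int) ∧
        0 ≤ c + ((word.toList.length : Int) - 1) * dy ∧
        c + ((word.toList.length : Int) - 1) * dy < ((PySem.List.pyGetD grid 0 ([] : List String)).length : Int))
    swap
    · rw [if_neg h0, if_pos hfit] at hA; exact absurd hA (by simp)
    rw [if_neg h0, if_neg (not_not_intro hfit), List.all_eq_true] at hA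
    have h0' : (pvGridGet grid r c).toList = [pvWChar word 0] := not_not.mp h0
    intro i hi
    have hcell : pvCellEq grid (r + (i : Int) * dx, c + (i : Int) * dy) word.toList[i] = true := by
      rcases Nat.eq_zero_or_pos i with rfl | hi0
      · simpa [pvCellEq, ← pv_wchar_eq word 0 hn] using h0'
      · have hmem : (i : Int) ∈ PySem.List.pyRange 1 (word.toList.length : Int) 1 := by
          rw [PySem.List.mem_pyRange_one]
          exact ⟨by exact_mod_cast hi0, by exact_mod_cast hi⟩
        have := hA _ hmem
        simpa [pvCellEq, pv_wchar_eq word i hi] using this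
    refine ⟨?_, hcell⟩
    have h1 := pv_mid_bounds r (grid.length : Int) dx word.toList.length i hdx
      ⟨hB0.1, hB0.2.1⟩ ⟨hfit.1, hfit.2.1⟩ hi
    have h2 := pv_mid_bounds c ((PySem.List.pyGetD grid 0 ([] : List String)).length : Int)
      dy word.toList.length i hdy ⟨hB0.2.2.1, hB0.2.2.2⟩ ⟨hfit.2.2.1, hfit.2.2.2⟩ hi
    simp only [pvInB, decide_eq_true_eq]
    exact ⟨h1.1, h1.2, h2.1, h2.2⟩
  · intro h
    have h0 := h 0 hn
    have hlast := h (word.toList.length - 1) (by omega)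
    have hcast : ((word.toList.length - 1 : Nat) : Int) = (word.toList.length : Int) - 1 := by
      omega
    have hfit : 0 ≤ r + ((word.toList.length : Int) - 1) * dx ∧
        r + ((word.toList.length : Int) - 1) * dx < (grid.length : Int) ∧
        0 ≤ c + ((word.toList.length : Int) - 1) * dy ∧
        c + ((word.toList.length : Int) - 1) * dy < ((PySem.List.pyGetD grid 0 ([] : List String)).length : Int) := by
      have := hlast.1
      rw [hcast] at this
      simpa only [pvInB, decide_eq_true_eq] using this
    have hw0 : pvWChar word 0 = word.toList[0] := by
      simpa using pv_wchar_eq word 0 hn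
    have hc0 : ¬ (pvGridGet grid r c).toList ≠ [pvWChar word 0] := by
      have := h0.2
      simp only [pvCellEq, beq_iff_eq, Nat.cast_zero, zero_mul, add_zero] at this
      simp only [hw0]
      exact not_not_intro this
    rw [if_neg hc0, if_neg (not_not_intro hfit), List.all_eq_true]
    intro i hmem
    rw [PySem.List.mem_pyRange_one] at hmem
    have hiN : i.toNat < word.toList.length := by omega
    have hieq : ((i.toNat : Nat) : Int) = i := by omega
    have hwc : pvWChar word i = word.toList[i.toNat] := by
      have h2 := pv_wchar_eq word i.toNat hiN
      rwa [hieq] at h2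
    have := (h i.toNat hiN).2
    rw [hieq] at this
    simp only [pvCellEq] at this
    simpa [hwc] using this

-- A's per-cell test equals B's any-direction test on in-bounds cells
lemma pv_cell_eq (grid : List (List String)) (word : String) (hw : word.toList ≠ [])
    (r c : Int) (hB : pvInB grid (r, c) = true) :
    pvSearchFromCell r c word grid = pvQ grid word.toList (r, c) := by
  unfold pvSearchFromCell pvQ
  apply PySem.List.any_congr_mem
  intro d hd
  have hdx : d.1 = -1 ∨ d.1 = 0 ∨ d.1 = 1 := by
    simp only [pvDirections, List.mem_cons, List.not_mem_nil, or_false] at hd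
    rcases hd with h|h|h|h|h|h|h|h <;> subst h <;> simp
  have hdy : d.2 = -1 ∨ d.2 = 0 ∨ d.2 = 1 := by
    simp only [pvDirections, List.mem_cons, List.not_mem_nil, or_false] at hd
    rcases hd with h|h|h|h|h|h|h|h <;> subst h <;> simp
  exact pv_dir_chk grid word hw r c d.1 d.2 hdx hdy hB

-- a fold of set-updates is one update by the concatenation
lemma pv_foldl_update {α β : Type} [BEq α] (l : List β) (g : β → List α) (s : PySem.Set α) :
    l.foldl (fun s b => PySem.Set.update s (g b)) s = PySem.Set.update s (l.flatMap g) := by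
  induction l generalizing s with
  | nil => simp [PySem.Set.update_nil]
  | cons b t ih => simp [List.foldl_cons, ih, PySem.Set.update_append]

lemma pv_sum_cast (l : List Int) (f : Int → Nat) :
    (l.map fun x => ((f x : Nat) : Int)).sum = (((l.map f).sum : Nat) : Int) := by
  induction l with
  | nil => simp
  | cons a t ih => simp [List.map_cons, List.sum_cons, ih, Nat.cast_add]

-- the early-exit guard is redundant: one step from an empty frontier is empty anyway
lemma pv_guard (grid : List (List String)) (d : Int × Int) (fr : PySem.Set (Int × Int)) (ch : Char) :
    (if fr = [] then fr
     else PySem.Set.ofList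
       ((pvAllCells (grid.length : Int) ((PySem.List.pyGetD grid 0 ([] : List String)).length : Int)).filter
         fun p => pvCellEq grid p ch && PySem.Set.contains fr (p.1 + d.1, p.2 + d.2)))
    = PySem.Set.ofList
       ((pvAllCells (grid.length : Int) ((PySem.List.pyGetD grid 0 ([] : List String)).length : Int)).filter
         fun p => pvCellEq grid p ch && PySem.Set.contains fr (p.1 + d.1, p.2 + d.2)) := by
  split_ifs with h
  · rw [h]
    have hfalse : ∀ p : Int × Int,
        (pvCellEq grid p ch && PySem.Set.contains ([] : PySem.Set (Int × Int)) (p.1 + d.1, p.2 + d.2))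
          = false := by
      intro p; simp [PySem.Set.contains]
    simp [hfalse]
  · rfl

-- B computes the length of the deduplicated direction-major match list
lemma pv_B_eq (grid : List (List String)) (word : String) (hw : word.toList ≠ []) :
    find_all_instances_in_grid_alt grid word =
      ((PySem.Set.ofList (pvDirections.flatMap fun d =>
        (pvAllCells (grid.length : Int) ((PySem.List.pyGetD grid 0 ([] : List String)).length : Int)).filter
          (pvChk grid d.1 d.2 word.toList))).length : Int) := by
  simp only [find_all_instances_in_grid_alt]
  congr 2
  have hneg : PySem.List.pyGetD word.toList (-1) ' ' = word.toList.getLast hw :=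
    pv_pyGetD_neg_one word.toList hw ' '
  have hfr : ∀ d : Int × Int,
      ((PySem.List.slice word.toList none (some (-1))).reverse).foldl
        (fun (fr : PySem.Set (Int × Int)) ch =>
          PySem.Set.ofList
            ((pvAllCells (grid.length : Int) ((PySem.List.pyGetD grid 0 ([] : List String)).length : Int)).filter
              fun p => pvCellEq grid p ch && PySem.Set.contains fr (p.1 + d.1, p.2 + d.2)))
        (PySem.Set.ofList
          ((pvAllCells (grid.length : Int) ((PySem.List.pyGetD grid 0 ([] : List String)).length : Int)).filter
            fun p => pvCellEq grid p (PySem.List.pyGetD word.toList (-1) ' ')))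
      = (pvAllCells (grid.length : Int) ((PySem.List.pyGetD grid 0 ([] : List String)).length : Int)).filter
          (pvChk grid d.1 d.2 word.toList) := by
    intro d
    rw [PySem.List.slice_to_neg_one, List.foldl_reverse, hneg,
      pv_frontier_inv grid d.1 d.2 (word.toList.getLast hw) word.toList.dropLast,
      List.dropLast_append_getLast hw]
  calc
    pvDirections.foldl
      (fun (starts : PySem.Set (Int × Int)) d =>
        PySem.Set.update starts
          (((PySem.List.slice word.toList none (some (-1))).reverse).foldl
            (fun (fr : PySem.Set (Int × Int)) ch =>
              if fr = [] then fr
              else PySem.Set.ofList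
                ((pvAllCells (grid.length : Int) ((PySem.List.pyGetD grid 0 ([] : List String)).length : Int)).filter
                  fun p => pvCellEq grid p ch && PySem.Set.contains fr (p.1 + d.1, p.2 + d.2)))
            (PySem.Set.ofList
              ((pvAllCells (grid.length : Int) ((PySem.List.pyGetD grid 0 ([] : List String)).length : Int)).filter
                fun p => pvCellEq grid p (PySem.List.pyGetD word.toList (-1) ' ')))))
      PySem.Set.empty
        = pvDirections.foldl
            (fun (starts : PySem.Set (Int × Int)) d =>
              PySem.Set.update starts
                (((PySem.List.slice word.toList none (some (-1))).reverse).foldl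
                  (fun (fr : PySem.Set (Int × Int)) ch =>
                    PySem.Set.ofList
                      ((pvAllCells (grid.length : Int) ((PySem.List.pyGetD grid 0 ([] : List String)).length : Int)).filter
                        fun p => pvCellEq grid p ch && PySem.Set.contains fr (p.1 + d.1, p.2 + d.2)))
                  (PySem.Set.ofList
                    ((pvAllCells (grid.length : Int) ((PySem.List.pyGetD grid 0 ([] : List String)).length : Int)).filter
                      fun p => pvCellEq grid p (PySem.List.pyGetD word.toList (-1) ' ')))))
            PySem.Set.empty :=
          PySem.List.foldl_congr_mem _ _ _ _ (fun s d _ => by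
            rw [PySem.List.foldl_congr_mem _ _ _ _ (fun fr ch _ => pv_guard grid d fr ch)])
    _ = pvDirections.foldl
            (fun (starts : PySem.Set (Int × Int)) d =>
              PySem.Set.update starts
                ((pvAllCells (grid.length : Int) ((PySem.List.pyGetD grid 0 ([] : List String)).length : Int)).filter
                  (pvChk grid d.1 d.2 word.toList)))
            PySem.Set.empty :=
          PySem.List.foldl_congr_mem _ _ _ _ (fun s d _ => by rw [hfr d])
    _ = PySem.Set.update PySem.Set.empty
          (pvDirections.flatMap fun d =>
            (pvAllCells (grid.length : Int) ((PySem.List.pyGetD grid 0 ([] : List String)).length : Int)).filter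
              (pvChk grid d.1 d.2 word.toList)) := pv_foldl_update _ _ _
    _ = _ := rfl

-- A counts the cells of pvK
lemma pv_A_eq (grid : List (List String)) (word : String) (hw : word.toList ≠ []) :
    find_all_instances_in_grid grid word = ((pvK grid word.toList).length : Int) := by
  simp only [find_all_instances_in_grid]
  have hcell : ∀ (acc : Int) (r : Int), r ∈ PySem.List.pyRange 0 (grid.length : Int) 1 →
      (PySem.List.pyRange 0 ((PySem.List.pyGetD grid 0 ([] : List String)).length : Int) 1).foldl
        (fun acc2 c => if pvSearchFromCell r c word grid then acc2 + 1 else acc2) acc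
      = (PySem.List.pyRange 0 ((PySem.List.pyGetD grid 0 ([] : List String)).length : Int) 1).foldl
          (fun acc2 c => if pvQ grid word.toList (r, c) then acc2 + 1 else acc2) acc := by
    intro acc r hr
    apply PySem.List.foldl_congr_mem
    intro acc2 c hc
    rw [PySem.List.mem_pyRange_one] at hr hc
    rw [pv_cell_eq grid word hw r c
      (by simp only [pvInB, decide_eq_true_eq]; exact ⟨hr.1, hr.2, hc.1, hc.2⟩)]
  rw [PySem.List.foldl_congr_mem _ _ _ _ hcell]
  have h1 : ∀ (acc : Int) (r : Int),
      (PySem.List.pyRange 0 ((PySem.List.pyGetD grid 0 ([] : List String)).length : Int) 1).foldl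
        (fun acc2 c => if pvQ grid word.toList (r, c) then acc2 + 1 else acc2) acc
      = acc + (((PySem.List.pyRange 0 ((PySem.List.pyGetD grid 0 ([] : List String)).length : Int) 1).countP
            (fun c => pvQ grid word.toList (r, c)) : Nat) : Int) := by
    intro acc r
    rw [PySem.List.foldl_if_add_one]
  rw [PySem.List.foldl_congr_mem _ _ _ _ (fun acc r _ => h1 acc r), PySem.List.foldl_add, zero_add,
    pv_sum_cast]
  congr 1
  simp only [pvK, pvAllCells, List.filter_flatMap, List.length_flatMap]
  congr 1
  apply List.map_congr_left
  intro r _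
  rw [List.filter_map, List.length_map, ← List.countP_eq_length_filter]
  rfl

-- membership shuffle between direction-major and row-major match lists
lemma pv_mem (grid : List (List String)) (word : String) (x : Int × Int) :
    x ∈ PySem.Set.ofList (pvDirections.flatMap fun d =>
        (pvAllCells (grid.length : Int) ((PySem.List.pyGetD grid 0 ([] : List String)).length : Int)).filter
          (pvChk grid d.1 d.2 word.toList))
      ↔ x ∈ pvK grid word.toList := by
  rw [PySem.Set.mem_ofList]
  simp only [pvK, pvQ, List.mem_flatMap, List.mem_filter, List.any_eq_true]
  tauto

lemma pv_K_nodup (grid : List (List String)) (word : String) : (pvK grid word.toList).Nodup :=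
  List.Nodup.filter _ (pv_nodup_allCells _ _)

-- ===== VERDICT (by name: the statement is the Claim_ definition above) =====
theorem find_all_instances_in_grid_spec : Claim_equal_find_all_instances_in_grid := by
  intro grid word _ hpre
  obtain ⟨-, hw, -⟩ := hpre
  have hwl : word.toList ≠ [] := by
    intro hh
    apply hw
    cases word
    simp_all
  show find_all_instances_in_grid grid word = find_all_instances_in_grid_alt grid word
  rw [pv_A_eq grid word hwl, pv_B_eq grid word hwl]
  have hperm : (PySem.Set.ofList (pvDirections.flatMap fun d =>
      (pvAllCells (grid.length : Int) ((PySem.List.pyGetD grid 0 ([] : List String)).length : Int)).filter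
        (pvChk grid d.1 d.2 word.toList))).Perm (pvK grid word.toList) :=
    (List.perm_ext_iff_of_nodup (PySem.Set.nodup_ofList _) (pv_K_nodup grid word)).mpr
      (fun x => pv_mem grid word x)
  rw [hperm.length_eq]
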